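-- pv_equiv track=rewrite | github.com/rmsepic/Algorithms | Python/zigzag.py | calcArr
-- ===== SOURCE A (Python) =====
-- def calcArr(rows: int) -> list:
--     arr = [(1, 1) for _ in range(rows)]
--     left = rows * 2 - 3
--     right = 1
--
--     arr[0] = (left, left)
--     arr[rows - 1] = (left, left)
--
--     left -= 2
--
--     for r in range(1, (rows + 1) // 2 ):
--         arr[r] = (left, right)
--         arr[rows - r - 1] = (right, left)
--         left -= 2
--         right += 2
--
--     return arr
-- ===== SOURCE B (Python) =====
-- def calcArr(rows: int) -> list:
--     L = 2 * rows - 3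
--     m = (rows + 1) // 2
--
--     def cell(i):
--         if i == 0 or i == rows - 1:
--             return (L, L)
--         if i < m:
--             return (L - 2 * i, 2 * i - 1)
--         r = rows - 1 - i
--         if r < m:
--             return (2 * r - 1, L - 2 * r)
--         return (1, 1)
--
--     return [cell(i) for i in range(rows)]
-- ===== Notes on version B (the rewrite author's own statement) =====
-- stated objective: alternative
-- what changed: Replaces A's in-place two-ended mutation loop (filling arr[r] and arr[rows-r-1] per iteration while stepping left/right counters) with a single left-to-right pass that computes each position independently from a closed-form per-index formula.
import Mathlib
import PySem

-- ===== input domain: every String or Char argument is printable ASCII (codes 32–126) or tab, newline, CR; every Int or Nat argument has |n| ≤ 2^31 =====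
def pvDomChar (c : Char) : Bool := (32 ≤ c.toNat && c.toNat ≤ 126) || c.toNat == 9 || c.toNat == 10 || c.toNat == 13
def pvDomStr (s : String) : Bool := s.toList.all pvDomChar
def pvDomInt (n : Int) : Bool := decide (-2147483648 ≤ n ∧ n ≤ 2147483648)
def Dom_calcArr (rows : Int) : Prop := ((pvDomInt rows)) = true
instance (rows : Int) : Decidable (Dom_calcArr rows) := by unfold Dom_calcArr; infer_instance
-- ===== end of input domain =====

-- B computes each zigzag boundary pair by a closed-form per-index formula in one forward pass
-- instead of A's two-ended in-place mutation loop (alternative decomposition, same cost).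


-- ===== PORT A =====
-- the body of A's for-loop: arr[r]=(left,right); arr[rows-r-1]=(right,left); left-=2; right+=2
def pvStepA (rows : Int) (s : List (Int × Int) × Int × Int) (r : Int) : List (Int × Int) × Int × Int :=
  let arr := PySem.List.pySetD s.1 r (s.2.1, s.2.2)
  let arr := PySem.List.pySetD arr (rows - r - 1) (s.2.2, s.2.1)
  (arr, s.2.1 - 2, s.2.2 + 2)

def calcArr (rows : Int) : List (Int × Int) :=
  let arr := (PySem.List.pyRange 0 rows 1).map (fun _ => ((1 : Int), (1 : Int)))
  let left := rows * 2 - 3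
  let right : Int := 1
  let arr := PySem.List.pySetD arr 0 (left, left)
  let arr := PySem.List.pySetD arr (rows - 1) (left, left)
  let left := left - 2
  let st := (PySem.List.pyRange 1 (PySem.Int.floordiv (rows + 1) 2) 1).foldl (pvStepA rows) (arr, left, right)
  st.1

-- ===== PORT B =====
def pvCell (rows i : Int) : Int × Int :=
  let L := 2 * rows - 3
  let m := PySem.Int.floordiv (rows + 1) 2
  if i = 0 ∨ i = rows - 1 then (L, L)
  else if i < m then (L - 2 * i, 2 * i - 1)
  else
    let r := rows - 1 - i
    if r < m then (2 * r - 1, L - 2 * r) else (1, 1)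

def calcArr_alt (rows : Int) : List (Int × Int) :=
  (PySem.List.pyRange 0 rows 1).map (fun i => pvCell rows i)

-- ===== PRECONDITION & SPEC =====
-- A indexes arr[0] unconditionally, so it raises IndexError for rows <= 0.
def Pre_calcArr (rows : Int) : Prop := 1 ≤ rows
instance (rows : Int) : Decidable (Pre_calcArr rows) := by unfold Pre_calcArr; infer_instance
def pvWitness_calcArr : Int := 5

def Spec_calcArr (rows : Int) (out : List (Int × Int)) : Prop := out = calcArr_alt rows
instance (rows : Int) (out : List (Int × Int)) : Decidable (Spec_calcArr rows out) := by unfold Spec_calcArr; infer_instance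

-- ===== CLAIM (what is proved, stated in full; the proofs are below) =====
def Claim_equal_calcArr : Prop := ∀ (rows : Int), Dom_calcArr rows → Pre_calcArr rows → Spec_calcArr rows (calcArr rows)

-- ===== LEMMAS AND PROOFS =====

-- loop invariant: after folding pvStepA over range(k, m), position j holds the closed-form
-- value if it was written by some iteration r ∈ [k, m), and its previous content otherwise
theorem pv_loop_inv (rows m : Int) (hm : 2 * m ≤ rows + 1) (hr : 1 ≤ rows) :
    ∀ (k : Int) (arr : List (Int × Int)), 1 ≤ k → arr.length = rows.toNat →
    (((PySem.List.pyRange k m 1).foldl (pvStepA rows)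
        (arr, rows * 2 - 3 - 2 * k, 2 * k - 1)).1.length = rows.toNat ∧
     ∀ j : Nat, j < rows.toNat →
      ((PySem.List.pyRange k m 1).foldl (pvStepA rows)
        (arr, rows * 2 - 3 - 2 * k, 2 * k - 1)).1[j]? =
      (if k ≤ (j : Int) ∧ (j : Int) < m then
          some (2 * rows - 3 - 2 * j, 2 * (j : Int) - 1)
        else if k ≤ rows - 1 - j ∧ rows - 1 - j < m then
          some (2 * (rows - 1 - (j : Int)) - 1, 2 * rows - 3 - 2 * (rows - 1 - (j : Int)))
        else arr[j]?)) := by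
  suffices H : ∀ (t : Nat) (k : Int) (arr : List (Int × Int)), (m - k).toNat ≤ t → 1 ≤ k →
      arr.length = rows.toNat →
      (((PySem.List.pyRange k m 1).foldl (pvStepA rows)
          (arr, rows * 2 - 3 - 2 * k, 2 * k - 1)).1.length = rows.toNat ∧
       ∀ j : Nat, j < rows.toNat →
        ((PySem.List.pyRange k m 1).foldl (pvStepA rows)
          (arr, rows * 2 - 3 - 2 * k, 2 * k - 1)).1[j]? =
        (if k ≤ (j : Int) ∧ (j : Int) < m then
            some (2 * rows - 3 - 2 * j, 2 * (j : Int) - 1)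
          else if k ≤ rows - 1 - j ∧ rows - 1 - j < m then
            some (2 * (rows - 1 - (j : Int)) - 1, 2 * rows - 3 - 2 * (rows - 1 - (j : Int)))
          else arr[j]?)) by
    intro k arr hk hlen
    exact H (m - k).toNat k arr le_rfl hk hlen
  intro t
  induction t with
  | zero =>
    intro k arr hbound hk hlen
    have hkm : m ≤ k := by omega
    rw [PySem.List.pyRange_one_eq_nil hkm]
    simp only [List.foldl_nil]
    refine ⟨hlen, fun j hj => ?_⟩
    rw [if_neg (by omega), if_neg (by omega)]
  | succ t ih =>
    intro k arr hbound hk hlen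
    by_cases hkm : m ≤ k
    · rw [PySem.List.pyRange_one_eq_nil hkm]
      simp only [List.foldl_nil]
      refine ⟨hlen, fun j hj => ?_⟩
      rw [if_neg (by omega), if_neg (by omega)]
    · rw [not_le] at hkm
      rw [PySem.List.pyRange_one_cons hkm, List.foldl_cons]
      have h0k : (0:Int) ≤ k := by omega
      have h0rk : (0:Int) ≤ rows - k - 1 := by omega
      have hstep : pvStepA rows (arr, rows * 2 - 3 - 2 * k, 2 * k - 1) k =
          ((arr.set k.toNat (rows * 2 - 3 - 2 * k, 2 * k - 1)).set (rows - k - 1).toNat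
              (2 * k - 1, rows * 2 - 3 - 2 * k),
           rows * 2 - 3 - 2 * (k + 1), 2 * (k + 1) - 1) := by
        simp only [pvStepA, PySem.List.pySetD_of_nonneg _ _ h0k,
          PySem.List.pySetD_of_nonneg _ _ h0rk, Prod.mk.injEq]
        exact ⟨trivial, by ring, by ring⟩
      rw [hstep]
      obtain ⟨hlen', hchar⟩ := ih (k + 1)
        ((arr.set k.toNat (rows * 2 - 3 - 2 * k, 2 * k - 1)).set (rows - k - 1).toNat
            (2 * k - 1, rows * 2 - 3 - 2 * k))
        (by omega) (by omega) (by simp [hlen])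
      refine ⟨hlen', fun j hj => ?_⟩
      rw [hchar j hj]
      rw [List.getElem?_set, List.getElem?_set]
      simp only [List.length_set, hlen]
      split_ifs <;>
        first
        | rfl
        | (exfalso; omega)
        | (simp only [Option.some.injEq, Prod.mk.injEq]; constructor <;> omega)

theorem calcArr_spec : Claim_equal_calcArr := by
  intro rows _ hpre
  unfold Pre_calcArr at hpre
  unfold Spec_calcArr
  obtain ⟨n, hn⟩ : ∃ n : Nat, rows = (n : Int) := ⟨rows.toNat, by omega⟩
  subst hn
  have hn1 : 1 ≤ n := by exact_mod_cast hpre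
  have hmspec := (PySem.Int.floordiv_eq_iff_of_pos
      (a := (n : Int) + 1) (b := 2) (q := PySem.Int.floordiv ((n : Int) + 1) 2)
      (by norm_num)).mp rfl
  have hlen2 : (PySem.List.pySetD
      (PySem.List.pySetD ((PySem.List.pyRange 0 (n : Int) 1).map
        (fun _ => ((1 : Int), (1 : Int)))) 0 ((n : Int) * 2 - 3, (n : Int) * 2 - 3))
      ((n : Int) - 1) ((n : Int) * 2 - 3, (n : Int) * 2 - 3)).length = ((n : Int)).toNat := by
    simp [PySem.List.length_pySetD, PySem.List.length_pyRange_one]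
  have H := pv_loop_inv (n : Int) (PySem.Int.floordiv ((n : Int) + 1) 2)
    (by omega) (by exact_mod_cast hn1) 1
    (PySem.List.pySetD
      (PySem.List.pySetD ((PySem.List.pyRange 0 (n : Int) 1).map
        (fun _ => ((1 : Int), (1 : Int)))) 0 ((n : Int) * 2 - 3, (n : Int) * 2 - 3))
      ((n : Int) - 1) ((n : Int) * 2 - 3, (n : Int) * 2 - 3))
    le_rfl hlen2
  simp only [show ((n : Int) * 2 - 3 - 2 * 1) = (n : Int) * 2 - 3 - 2 from by ring,
    show (2 * (1 : Int) - 1) = 1 from by norm_num] at H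
  obtain ⟨Hlen, Hchar⟩ := H
  apply List.ext_getElem?
  intro j
  simp only [calcArr, calcArr_alt]
  by_cases hj : j < n
  · rw [Hchar j (by omega), PySem.List.getElem?_map_pyRange_zero (fun i => pvCell (n : Int) i) n j hj]
    rw [PySem.List.pySetD_of_nonneg _ _ (by omega : (0:Int) ≤ (n : Int) - 1),
      PySem.List.pySetD_of_nonneg _ _ (le_refl (0:Int))]
    rw [List.getElem?_set, List.getElem?_set]
    simp only [List.length_set, List.length_map, PySem.List.length_pyRange_one,
      PySem.List.getElem?_map_pyRange_zero (fun _ => ((1 : Int), (1 : Int))) n j hj]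
    simp only [pvCell]
    split_ifs <;>
      first
      | rfl
      | (exfalso; omega)
      | (simp only [Option.some.injEq, Prod.mk.injEq]; constructor <;> omega)
  · rw [List.getElem?_eq_none (le_of_eq_of_le Hlen (by omega)),
      List.getElem?_eq_none (by simp [PySem.List.length_pyRange_one]; omega)]
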